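-- pv_equiv track=rewrite | github.com/kloseliebej/Knowledge-based-AI | Agent_Verbal+Visual.py | isEqualAttributes
-- ===== SOURCE A (Python) =====
-- def isEqualAttributes(attribute1, attribute2):
--     if len(attribute1) != len(attribute2):
--         return 0
--
--     for attributeName in attribute1:
--         if attributeName not in attribute2:
--             return 0
--         else:
--             if attribute1[attributeName] != attribute2[attributeName]:
--                 if attributeName == "shape" or attributeName == "fill" or attributeName == "size" or attributeName == "angle" or attributeName == "alignment" or attributeName == "width" or attributeName == "height" or attributeName == "alignmentx" or attributeName == "alignmenty":
--                     return 0
--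
--     return 1
-- ===== SOURCE B (Python) =====
-- KEY_ATTRS = ('shape', 'fill', 'size', 'angle', 'alignment', 'width', 'height', 'alignmentx', 'alignmenty')
--
--
-- def isEqualAttributes(attribute1, attribute2):
--     if len(attribute1) != len(attribute2) or set(attribute1) != set(attribute2):
--         return 0
--     for name in KEY_ATTRS:
--         if name in attribute1 and name in attribute2 and attribute1[name] != attribute2[name]:
--             return 0
--     return 1
-- ===== Notes on version B (the rewrite author's own statement) =====
-- stated objective: alternative
-- what changed: B first decides key-set equality outright (length + set comparison of the key sets) and then loops over the fixed 9-element tuple of key attributes, instead of A's single fused loop over attribute1 interleaving membership tests with value checks; B's second loop is bounded by the constant key list rather than the input size.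
import Mathlib
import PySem

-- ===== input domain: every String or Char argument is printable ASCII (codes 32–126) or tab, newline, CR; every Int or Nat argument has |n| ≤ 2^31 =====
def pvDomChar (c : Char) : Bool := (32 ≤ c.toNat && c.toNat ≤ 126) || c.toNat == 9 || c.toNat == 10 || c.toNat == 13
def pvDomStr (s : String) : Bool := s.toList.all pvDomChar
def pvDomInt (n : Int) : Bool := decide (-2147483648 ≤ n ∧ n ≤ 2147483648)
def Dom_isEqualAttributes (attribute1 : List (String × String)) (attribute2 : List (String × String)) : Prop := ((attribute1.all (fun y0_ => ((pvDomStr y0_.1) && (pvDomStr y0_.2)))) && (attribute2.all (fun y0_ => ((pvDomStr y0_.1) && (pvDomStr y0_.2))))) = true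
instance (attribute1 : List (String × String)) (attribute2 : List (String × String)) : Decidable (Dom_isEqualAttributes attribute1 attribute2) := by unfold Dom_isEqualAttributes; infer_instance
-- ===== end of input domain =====

-- B replaces A's single fused loop over attribute1 with an up-front key-set equality check
-- followed by a loop over the fixed tuple of key attributes (objective: alternative).


-- ===== PORT A =====
-- A's for-loop over attribute1's keys; d1[k] / d2[k] after the membership test is exact as getD
def pvALoop (d1 d2 : PySem.Dict String String) : List (String × String) → Int
  | [] => 1
  | (k, _) :: rest =>
    if ¬ d2.contains k then 0
    else
      if d1.getD k "" ≠ d2.getD k "" then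
        if k = "shape" ∨ k = "fill" ∨ k = "size" ∨ k = "angle" ∨ k = "alignment" ∨ k = "width" ∨ k = "height" ∨ k = "alignmentx" ∨ k = "alignmenty" then 0
        else pvALoop d1 d2 rest
      else pvALoop d1 d2 rest

def isEqualAttributes (attribute1 : List (String × String)) (attribute2 : List (String × String)) : Int :=
  let d1 := PySem.Dict.mk attribute1
  let d2 := PySem.Dict.mk attribute2
  if d1.size ≠ d2.size then 0
  else pvALoop d1 d2 attribute1

-- ===== PORT B =====
def pvKeyAttrs : List String := ["shape", "fill", "size", "angle", "alignment", "width", "height", "alignmentx", "alignmenty"]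

def pvBLoop (d1 d2 : PySem.Dict String String) : List String → Int
  | [] => 1
  | k :: rest =>
    if d1.contains k ∧ d2.contains k ∧ d1.getD k "" ≠ d2.getD k "" then 0
    else pvBLoop d1 d2 rest

def isEqualAttributes_alt (attribute1 : List (String × String)) (attribute2 : List (String × String)) : Int :=
  let d1 := PySem.Dict.mk attribute1
  let d2 := PySem.Dict.mk attribute2
  if d1.size ≠ d2.size ∨ ¬ (PySem.Set.equal (PySem.Set.ofList d1.keys) (PySem.Set.ofList d2.keys) = true) then 0
  else pvBLoop d1 d2 pvKeyAttrs

-- ===== PRECONDITION & SPEC =====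
-- Pre_ excludes association lists with duplicate keys: those do not represent any Python dict
-- (a Python dict's keys are necessarily distinct), so A is never called on them.
def Pre_isEqualAttributes (attribute1 : List (String × String)) (attribute2 : List (String × String)) : Prop :=
  (attribute1.map Prod.fst).Nodup ∧ (attribute2.map Prod.fst).Nodup
instance (attribute1 : List (String × String)) (attribute2 : List (String × String)) : Decidable (Pre_isEqualAttributes attribute1 attribute2) := by unfold Pre_isEqualAttributes; infer_instance

def pvWitness_isEqualAttributes : (List (String × String)) × (List (String × String)) :=
  ([("shape", "circle"), ("x", "1")], [("x", "2"), ("shape", "circle")])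

def Spec_isEqualAttributes (attribute1 : List (String × String)) (attribute2 : List (String × String)) (out : Int) : Prop := out = isEqualAttributes_alt attribute1 attribute2
instance (attribute1 : List (String × String)) (attribute2 : List (String × String)) (out : Int) : Decidable (Spec_isEqualAttributes attribute1 attribute2 out) := by unfold Spec_isEqualAttributes; infer_instance

-- ===== CLAIM (what is proved, stated in full; the proofs are below) =====
def Claim_equal_isEqualAttributes : Prop := ∀ (attribute1 : List (String × String)) (attribute2 : List (String × String)), Dom_isEqualAttributes attribute1 attribute2 → Pre_isEqualAttributes attribute1 attribute2 → Spec_isEqualAttributes attribute1 attribute2 (isEqualAttributes attribute1 attribute2)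

-- ===== LEMMAS AND PROOFS =====

theorem pvALoop_eq_any (d1 d2 : PySem.Dict String String) (l : List (String × String)) :
    pvALoop d1 d2 l =
      if l.any (fun p => !d2.contains p.1 || (decide (d1.getD p.1 "" ≠ d2.getD p.1 "") && decide (p.1 ∈ pvKeyAttrs))) then 0 else 1 := by
  induction l with
  | nil => simp [pvALoop]
  | cons p rest ih =>
    obtain ⟨k, v⟩ := p
    have hkiff : (k = "shape" ∨ k = "fill" ∨ k = "size" ∨ k = "angle" ∨ k = "alignment" ∨ k = "width" ∨ k = "height" ∨ k = "alignmentx" ∨ k = "alignmenty") ↔ k ∈ pvKeyAttrs := by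
      simp [pvKeyAttrs]
    simp only [pvALoop]
    by_cases hc : d2.contains k = true
    · rw [if_neg (fun h => h hc)]
      by_cases hd : d1.getD k "" ≠ d2.getD k ""
      · rw [if_pos hd]
        by_cases hk : k ∈ pvKeyAttrs
        · rw [if_pos (hkiff.mpr hk)]
          have hcons : (((k, v) :: rest).any (fun p => !d2.contains p.1 || (decide (d1.getD p.1 "" ≠ d2.getD p.1 "") && decide (p.1 ∈ pvKeyAttrs)))) = true := by
            simp [List.any_cons, hd, hk]
          rw [if_pos hcons]
        · rw [if_neg (fun h => hk (hkiff.mp h)), ih]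
          have hcons : (((k, v) :: rest).any (fun p => !d2.contains p.1 || (decide (d1.getD p.1 "" ≠ d2.getD p.1 "") && decide (p.1 ∈ pvKeyAttrs)))) = (rest.any (fun p => !d2.contains p.1 || (decide (d1.getD p.1 "" ≠ d2.getD p.1 "") && decide (p.1 ∈ pvKeyAttrs)))) := by
            simp [List.any_cons, hc, hk]
          rw [hcons]
      · rw [if_neg hd, ih]
        have hcons : (((k, v) :: rest).any (fun p => !d2.contains p.1 || (decide (d1.getD p.1 "" ≠ d2.getD p.1 "") && decide (p.1 ∈ pvKeyAttrs)))) = (rest.any (fun p => !d2.contains p.1 || (decide (d1.getD p.1 "" ≠ d2.getD p.1 "") && decide (p.1 ∈ pvKeyAttrs)))) := by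
            simp [List.any_cons, hc, hd]
        rw [hcons]
    · rw [if_pos hc]
      have hc' : d2.contains k = false := by simpa using hc
      have hcons : (((k, v) :: rest).any (fun p => !d2.contains p.1 || (decide (d1.getD p.1 "" ≠ d2.getD p.1 "") && decide (p.1 ∈ pvKeyAttrs)))) = true := by
        simp [List.any_cons, hc']
      rw [if_pos hcons]

theorem pvBLoop_eq_any (d1 d2 : PySem.Dict String String) (l : List String) :
    pvBLoop d1 d2 l =
      if l.any (fun k => d1.contains k && d2.contains k && decide (d1.getD k "" ≠ d2.getD k "")) then 0 else 1 := by
  induction l with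
  | nil => simp [pvBLoop]
  | cons k rest ih =>
    simp only [pvBLoop, List.any_cons]
    by_cases h : d1.contains k = true ∧ d2.contains k = true ∧ d1.getD k "" ≠ d2.getD k ""
    · simp [h]
    · rw [if_neg h, ih]
      by_cases h1 : d1.contains k = true
      · by_cases h2 : d2.contains k = true
        · have h3 : ¬ d1.getD k "" ≠ d2.getD k "" := fun hd => h ⟨h1, h2, hd⟩
          simp [h1, h2, h3]
        · simp [h2]
      · simp [h1]

theorem set_equal_iff (s t : List String) :
    PySem.Set.equal (PySem.Set.ofList s) (PySem.Set.ofList t) = true ↔ (∀ k, k ∈ s ↔ k ∈ t) := by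
  constructor
  · intro h k
    simp only [PySem.Set.equal, PySem.Set.issubset, Bool.and_eq_true, List.all_eq_true] at h
    constructor
    · intro hk
      have := h.1 k ((PySem.Set.mem_ofList s k).mpr hk)
      exact (PySem.Set.mem_ofList t k).mp (by simpa using this)
    · intro hk
      have := h.2 k ((PySem.Set.mem_ofList t k).mpr hk)
      exact (PySem.Set.mem_ofList s k).mp (by simpa using this)
  · intro h
    simp only [PySem.Set.equal, PySem.Set.issubset, Bool.and_eq_true, List.all_eq_true]
    refine ⟨fun k hk => ?_, fun k hk => ?_⟩
    · simpa using (PySem.Set.mem_ofList t k).mpr ((h k).mp ((PySem.Set.mem_ofList s k).mp hk))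
    · simpa using (PySem.Set.mem_ofList s k).mpr ((h k).mpr ((PySem.Set.mem_ofList t k).mp hk))

theorem contains_mk_iff (l : List (String × String)) (k : String) :
    (PySem.Dict.mk l).contains k = true ↔ k ∈ l.map Prod.fst := by
  rw [PySem.Dict.contains_eq_decide_mem_keys, PySem.Dict.keys_mk]
  simp

-- equal lengths + distinct keys + key-set inclusion force key-set equality
theorem keyset_eq_of_subset (K1 K2 : List String) (h1 : K1.Nodup) (h2 : K2.Nodup)
    (hlen : K1.length = K2.length) (hsub : ∀ k, k ∈ K1 → k ∈ K2) : ∀ k, k ∈ K1 ↔ k ∈ K2 := by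
  have hfs : K1.toFinset ⊆ K2.toFinset := by
    intro x hx; rw [List.mem_toFinset] at *; exact hsub x (by simpa using hx)
  have hcard : K2.toFinset.card ≤ K1.toFinset.card := by
    rw [List.toFinset_card_of_nodup h1, List.toFinset_card_of_nodup h2, hlen]
  have := Finset.eq_of_subset_of_card_le hfs hcard
  intro k
  constructor
  · exact hsub k
  · intro hk
    have : k ∈ K1.toFinset := by rw [this, List.mem_toFinset]; exact hk
    simpa using this

theorem isEqualAttributes_spec' (a1 a2 : List (String × String))
    (hpre : Pre_isEqualAttributes a1 a2) :
    isEqualAttributes a1 a2 = isEqualAttributes_alt a1 a2 := by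
  obtain ⟨h1, h2⟩ := hpre
  unfold isEqualAttributes isEqualAttributes_alt
  simp only []
  by_cases hlen : (PySem.Dict.mk a1).size = (PySem.Dict.mk a2).size
  · -- equal lengths
    have hlen' : (a1.map Prod.fst).length = (a2.map Prod.fst).length := by
      simpa [PySem.Dict.size, List.length_map] using hlen
    by_cases hset : ∀ k, k ∈ a1.map Prod.fst ↔ k ∈ a2.map Prod.fst
    · -- key sets equal: both run their loops; show the loops agree
      have hseq : PySem.Set.equal (PySem.Set.ofList (PySem.Dict.mk a1).keys) (PySem.Set.ofList (PySem.Dict.mk a2).keys) = true := by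
        rw [PySem.Dict.keys_mk, PySem.Dict.keys_mk]
        exact (set_equal_iff _ _).mpr hset
      have hcond : ¬ ((PySem.Dict.mk a1).size ≠ (PySem.Dict.mk a2).size ∨ ¬ (PySem.Set.equal (PySem.Set.ofList (PySem.Dict.mk a1).keys) (PySem.Set.ofList (PySem.Dict.mk a2).keys) = true)) := by
        rintro (h | h)
        · exact h hlen
        · exact h hseq
      rw [if_neg (by simp [hlen]), if_neg hcond]
      rw [pvALoop_eq_any, pvBLoop_eq_any]
      have hany : (a1.any (fun p => !(PySem.Dict.mk a2).contains p.1 || (decide ((PySem.Dict.mk a1).getD p.1 "" ≠ (PySem.Dict.mk a2).getD p.1 "") && decide (p.1 ∈ pvKeyAttrs))))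
          = (pvKeyAttrs.any (fun k => (PySem.Dict.mk a1).contains k && (PySem.Dict.mk a2).contains k && decide ((PySem.Dict.mk a1).getD k "" ≠ (PySem.Dict.mk a2).getD k ""))) := by
        rw [Bool.eq_iff_iff]
        simp only [List.any_eq_true, Bool.or_eq_true, Bool.and_eq_true, Bool.not_eq_true',
          decide_eq_true_eq]
        constructor
        · rintro ⟨p, hp, hcond⟩
          have hk1 : p.1 ∈ a1.map Prod.fst := List.mem_map_of_mem hp
          have hc2 : (PySem.Dict.mk a2).contains p.1 = true :=
            (contains_mk_iff a2 p.1).mpr ((hset p.1).mp hk1)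
          rcases hcond with hno | ⟨hd, hk⟩
          · rw [hc2] at hno; cases hno
          · exact ⟨p.1, hk, ⟨(contains_mk_iff a1 p.1).mpr hk1, hc2⟩, hd⟩
        · rintro ⟨k, hk, ⟨hc1, _⟩, hd⟩
          have hk1 : k ∈ a1.map Prod.fst := (contains_mk_iff a1 k).mp hc1
          obtain ⟨p, hp, hpk⟩ := List.exists_of_mem_map hk1
          exact ⟨p, hp, Or.inr ⟨by rwa [hpk], by rwa [hpk]⟩⟩
      rw [hany]
    · -- key sets differ: B returns 0 via the set test; A hits a missing key
      have hseq : ¬ PySem.Set.equal (PySem.Set.ofList (PySem.Dict.mk a1).keys) (PySem.Set.ofList (PySem.Dict.mk a2).keys) = true := by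
        rw [PySem.Dict.keys_mk, PySem.Dict.keys_mk]
        intro h; exact hset ((set_equal_iff _ _).mp h)
      rw [if_pos (Or.inr hseq)]
      have hnsub : ¬ ∀ k, k ∈ a1.map Prod.fst → k ∈ a2.map Prod.fst := by
        intro hsub
        exact hset (keyset_eq_of_subset _ _ h1 h2 hlen' hsub)
      push Not at hnsub
      obtain ⟨k, hk1, hk2⟩ := hnsub
      rw [if_neg (by simp [hlen]), pvALoop_eq_any, if_pos]
      obtain ⟨p, hp, hpk⟩ := List.exists_of_mem_map hk1
      refine List.any_eq_true.mpr ⟨p, hp, ?_⟩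
      have : (PySem.Dict.mk a2).contains p.1 = false := by
        rw [← Bool.not_eq_true]
        intro hc
        exact hk2 (by rw [← hpk]; exact (contains_mk_iff a2 p.1).mp hc)
      simp [this]
  · rw [if_pos hlen, if_pos (Or.inl hlen)]

-- ===== VERDICT (by name: the statement is the Claim_ definition above) =====
theorem isEqualAttributes_spec : Claim_equal_isEqualAttributes := by
  intro a1 a2 _ hpre
  unfold Spec_isEqualAttributes
  exact isEqualAttributes_spec' a1 a2 hpre
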